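-- pv_equiv track=rewrite | github.com/great-luao/ace-appworld | experiments/code/ace/prediction_diff_retrieval.py | build_index_maps
-- ===== SOURCE A (Python) =====
-- from collections import Counter, defaultdict
-- from typing import Any
--
-- def build_index_maps(
--     datapoints: list[dict[str, Any]],
-- ) -> tuple[dict[str, list[int]], dict[str, dict[str, list[int]]]]:
--     board_to_indices: defaultdict[str, list[int]] = defaultdict(list)
--     board_to_diff_to_indices: defaultdict[str, defaultdict[str, list[int]]] = defaultdict(
--         lambda: defaultdict(list)
--     )
--     for index, item in enumerate(datapoints):
--         board_to_indices[item["primary_board"]].append(index)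
--         if item["primary_board"] != "other" and item["diff_category"]:
--             board_to_diff_to_indices[item["primary_board"]][item["diff_category"]].append(index)
--     return dict(board_to_indices), {
--         board: dict(diff_to_indices) for board, diff_to_indices in board_to_diff_to_indices.items()
--     }
-- ===== SOURCE B (Python) =====
-- def build_index_maps(datapoints):
--     rows = [(i, it["primary_board"]) for i, it in enumerate(datapoints)]
--     board_to_indices = {b: [i for i, bb in rows if bb == b]
--                         for b in dict.fromkeys(b for _, b in rows)}
--     trips = [(i, it["primary_board"], it["diff_category"])
--              for i, it in enumerate(datapoints)
--              if it["primary_board"] != "other" and it["diff_category"]]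
--     nested = {b: {d: [i for i, bb, dd in trips if bb == b and dd == d]
--                   for d in dict.fromkeys(d for _, bb, d in trips if bb == b)}
--               for b in dict.fromkeys(b for _, b, _ in trips)}
--     return board_to_indices, nested
-- ===== Notes on version B (the rewrite author's own statement) =====
-- stated objective: alternative
-- what changed: Replaces A's single pass that incrementally appends into two mutable defaultdicts with a comprehension-based group-by: dedup the key sequences once, then build each bucket by filtering, so no mutable dict state is threaded through the loop.
import Mathlib
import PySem

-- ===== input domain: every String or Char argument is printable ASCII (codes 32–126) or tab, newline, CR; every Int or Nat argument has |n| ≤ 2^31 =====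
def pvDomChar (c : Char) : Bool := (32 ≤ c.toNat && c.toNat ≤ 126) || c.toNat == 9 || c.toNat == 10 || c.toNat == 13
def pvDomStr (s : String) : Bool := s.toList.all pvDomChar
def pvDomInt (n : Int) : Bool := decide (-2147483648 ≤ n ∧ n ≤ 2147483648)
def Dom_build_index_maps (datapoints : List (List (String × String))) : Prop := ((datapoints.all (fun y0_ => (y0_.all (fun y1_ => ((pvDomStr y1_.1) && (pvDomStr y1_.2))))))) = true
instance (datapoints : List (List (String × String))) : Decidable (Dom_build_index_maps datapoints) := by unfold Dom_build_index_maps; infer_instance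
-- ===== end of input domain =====

-- B's run is about the RETURN value only; neither program mutates its argument.
-- item[k] on a dict; under Pre_ the key is present, so the default is never used
def pvLookup (item : List (String × String)) (k : String) : String :=
  (PySem.Dict.mk item).getD k ""

-- ===== PORT A =====
-- one pass: two defaultdicts, append index under board (and under board/diff when board ≠ "other" and diff truthy)
def build_index_maps (datapoints : List (List (String × String))) : (List (String × List Int)) × (List (String × List (String × List Int))) :=
  let st := (PySem.List.enumerate datapoints).foldl
    (fun (st : PySem.Dict String (List Int) × PySem.Dict String (PySem.Dict String (List Int))) p =>
      let i := p.1
      let b := pvLookup p.2 "primary_board"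
      let d1 := st.1.modify b [] (fun v => v ++ [i])
      let d2 := if b != "other" && pvLookup p.2 "diff_category" != "" then
          st.2.modify b PySem.Dict.empty (fun dd => dd.modify (pvLookup p.2 "diff_category") [] (fun v => v ++ [i]))
        else st.2
      (d1, d2))
    (PySem.Dict.empty, PySem.Dict.empty)
  (st.1.items, st.2.items.map (fun q => (q.1, q.2.items)))

-- ===== PORT B =====
-- two-phase group-by: dedup the key sequences, then build each bucket by filtering
def build_index_maps_alt (datapoints : List (List (String × String))) : (List (String × List Int)) × (List (String × List (String × List Int))) :=
  let rows := (PySem.List.enumerate datapoints).map (fun p => (p.1, pvLookup p.2 "primary_board"))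
  let first := (PySem.List.dedup (rows.map (fun r => r.2))).map
    (fun b => (b, (rows.filter (fun r => r.2 == b)).map (fun r => r.1)))
  let trips := ((PySem.List.enumerate datapoints).filter
      (fun p => pvLookup p.2 "primary_board" != "other" && pvLookup p.2 "diff_category" != "")).map
    (fun p => (p.1, pvLookup p.2 "primary_board", pvLookup p.2 "diff_category"))
  let nested := (PySem.List.dedup (trips.map (fun t => t.2.1))).map
    (fun b => (b, (PySem.List.dedup ((trips.filter (fun t => t.2.1 == b)).map (fun t => t.2.2))).map
      (fun d => (d, (trips.filter (fun t => t.2.1 == b && t.2.2 == d)).map (fun t => t.1)))))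
  (first, nested)

-- ===== PRECONDITION & SPEC =====
-- Pre_ excludes exactly the inputs where A raises KeyError: an item without "primary_board",
-- or an item whose board ≠ "other" without "diff_category".
def Pre_build_index_maps (datapoints : List (List (String × String))) : Prop :=
  ∀ item ∈ datapoints, (PySem.Dict.mk item).contains "primary_board" = true ∧
    (pvLookup item "primary_board" ≠ "other" → (PySem.Dict.mk item).contains "diff_category" = true)
instance (datapoints : List (List (String × String))) : Decidable (Pre_build_index_maps datapoints) := by unfold Pre_build_index_maps; infer_instance
def pvWitness_build_index_maps : (List (List (String × String))) :=
  [[("primary_board", "a"), ("diff_category", "x")], [("primary_board", "other")]]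

def Spec_build_index_maps (datapoints : List (List (String × String))) (out : (List (String × List Int)) × (List (String × List (String × List Int)))) : Prop := out = build_index_maps_alt datapoints
instance (datapoints : List (List (String × String))) (out : (List (String × List Int)) × (List (String × List (String × List Int)))) : Decidable (Spec_build_index_maps datapoints out) := by unfold Spec_build_index_maps; infer_instance

-- ===== CLAIM (what is proved, stated in full; the proofs are below) =====
def Claim_equal_build_index_maps : Prop := ∀ (datapoints : List (List (String × String))), Dom_build_index_maps datapoints → Pre_build_index_maps datapoints → Spec_build_index_maps datapoints (build_index_maps datapoints)

-- ===== LEMMAS AND PROOFS =====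

-- a fold whose step updates the two components independently splits
theorem foldl_prod_split {α β γ : Type} (l : List γ) (f : α → γ → α) (g : β → γ → β) (a : α) (b : β) :
    l.foldl (fun p x => (f p.1 x, g p.2 x)) (a, b) = (l.foldl f a, l.foldl g b) := by
  induction l generalizing a b with
  | nil => rfl
  | cons x xs ih => simp [List.foldl_cons, ih]

-- getD of a keyed modify-fold: only the matching elements act, in order
theorem getD_foldl_modify_key {γ ν : Type} (l : List γ) (key : γ → String) (d0 : ν)
    (f : γ → ν → ν) (d : PySem.Dict String ν) (b : String) :
    (l.foldl (fun d x => d.modify (key x) d0 (f x)) d).getD b d0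
      = (l.filter (fun x => key x == b)).foldl (fun acc x => f x acc) (d.getD b d0) := by
  induction l generalizing d with
  | nil => rfl
  | cons x xs ih =>
    simp only [List.foldl_cons, List.filter_cons]
    by_cases h : key x = b
    · simp [h, ih, PySem.Dict.getD_modify_self]
    · have : (key x == b) = false := by simp [h]
      rw [this]
      simp only [Bool.false_eq_true, if_false]
      rw [ih, PySem.Dict.getD_modify_of_ne]
      exact fun hc => h hc.symm

-- items of a keyed append-fold from empty: dedup of keys, each with its filtered values
theorem foldl_append_singleton {γ : Type} (l : List γ) (val : γ → Int) (a : List Int) :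
    l.foldl (fun acc x => acc ++ [val x]) a = a ++ l.map val := by
  induction l generalizing a with
  | nil => simp
  | cons x xs ih => simp [ih]

theorem items_foldl_modify_append {γ : Type} (l : List γ) (key : γ → String) (val : γ → Int) :
    (l.foldl (fun d x => d.modify (key x) [] (fun v => v ++ [val x]))
        (PySem.Dict.empty : PySem.Dict String (List Int))).items
      = (PySem.List.dedup (l.map key)).map
          (fun b => (b, (l.filter (fun x => key x == b)).map val)) := by
  have hnd : (l.foldl (fun d x => d.modify (key x) [] (fun v => v ++ [val x]))
      (PySem.Dict.empty : PySem.Dict String (List Int))).keys.Nodup :=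
    PySem.Dict.nodup_keys_foldl_modify_key l key [] (fun _ x v => v ++ [val x]) _ (by simp)
  rw [PySem.Dict.items_eq_map_keys _ hnd []]
  have hkeys : (l.foldl (fun d x => d.modify (key x) [] (fun v => v ++ [val x]))
      (PySem.Dict.empty : PySem.Dict String (List Int))).keys = PySem.List.dedup (l.map key) := by
    rw [PySem.Dict.keys_foldl_modify_key]
    simp [PySem.Set.update_nil_left]
  rw [hkeys]
  apply List.map_congr_left
  intro b _
  rw [getD_foldl_modify_key l key [] (fun x v => v ++ [val x]) _ b]
  rw [foldl_append_singleton]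
  simp

theorem items_foldl_modify_nested {γ : Type} (l : List γ) (key dkey : γ → String) (val : γ → Int) :
    ((l.foldl (fun d x => d.modify (key x) PySem.Dict.empty
          (fun dd => dd.modify (dkey x) [] (fun v => v ++ [val x])))
        (PySem.Dict.empty : PySem.Dict String (PySem.Dict String (List Int)))).items.map
      (fun q => (q.1, q.2.items)))
  = (PySem.List.dedup (l.map key)).map (fun b =>
      (b, (PySem.List.dedup ((l.filter (fun x => key x == b)).map dkey)).map (fun d =>
        (d, (l.filter (fun x => key x == b && dkey x == d)).map val)))) := by
  have hnd : (l.foldl (fun d x => d.modify (key x) PySem.Dict.empty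
      (fun dd => dd.modify (dkey x) [] (fun v => v ++ [val x])))
      (PySem.Dict.empty : PySem.Dict String (PySem.Dict String (List Int)))).keys.Nodup :=
    PySem.Dict.nodup_keys_foldl_modify_key l key PySem.Dict.empty
      (fun _ x dd => dd.modify (dkey x) [] (fun v => v ++ [val x])) _ (by simp)
  rw [PySem.Dict.items_eq_map_keys _ hnd PySem.Dict.empty]
  have hkeys : (l.foldl (fun d x => d.modify (key x) PySem.Dict.empty
      (fun dd => dd.modify (dkey x) [] (fun v => v ++ [val x])))
      (PySem.Dict.empty : PySem.Dict String (PySem.Dict String (List Int)))).keys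
      = PySem.List.dedup (l.map key) := by
    rw [PySem.Dict.keys_foldl_modify_key]
    simp [PySem.Set.update_nil_left]
  rw [hkeys, List.map_map]
  apply List.map_congr_left
  intro b _
  simp only [Function.comp]
  rw [getD_foldl_modify_key l key PySem.Dict.empty
      (fun x dd => dd.modify (dkey x) [] (fun v => v ++ [val x])) _ b]
  simp only [PySem.Dict.getD_empty]
  rw [items_foldl_modify_append (l.filter (fun x => key x == b)) dkey val]
  simp only [List.filter_filter, Prod.mk.injEq, true_and]
  apply List.map_congr_left
  intro d _
  have hcomm : ∀ x ∈ l, ((dkey x == d) && (key x == b)) = ((key x == b) && (dkey x == d)) :=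
    fun x _ => Bool.and_comm _ _
  rw [List.filter_congr hcomm]

theorem build_index_maps_spec : Claim_equal_build_index_maps := by
  intro dps _ _
  unfold Spec_build_index_maps build_index_maps build_index_maps_alt
  simp only []
  have hsplit :
      List.foldl (fun (st : PySem.Dict String (List Int) × PySem.Dict String (PySem.Dict String (List Int)))
          (p : Int × List (String × String)) =>
          (st.1.modify (pvLookup p.2 "primary_board") [] (fun v => v ++ [p.1]),
            if pvLookup p.2 "primary_board" != "other" && pvLookup p.2 "diff_category" != "" then
              st.2.modify (pvLookup p.2 "primary_board") PySem.Dict.empty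
                (fun dd => dd.modify (pvLookup p.2 "diff_category") [] (fun v => v ++ [p.1]))
            else st.2))
        (PySem.Dict.empty, PySem.Dict.empty) (PySem.List.enumerate dps)
      = (List.foldl (fun d p => d.modify (pvLookup p.2 "primary_board") [] (fun v => v ++ [p.1]))
          PySem.Dict.empty (PySem.List.enumerate dps),
        List.foldl (fun d p =>
            if pvLookup p.2 "primary_board" != "other" && pvLookup p.2 "diff_category" != "" then
              d.modify (pvLookup p.2 "primary_board") PySem.Dict.empty
                (fun dd => dd.modify (pvLookup p.2 "diff_category") [] (fun v => v ++ [p.1]))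
            else d)
          PySem.Dict.empty (PySem.List.enumerate dps)) :=
    foldl_prod_split _
      (fun (d : PySem.Dict String (List Int)) (p : Int × List (String × String)) => d.modify (pvLookup p.2 "primary_board") [] (fun v => v ++ [p.1]))
      (fun (d : PySem.Dict String (PySem.Dict String (List Int))) (p : Int × List (String × String)) =>
        if pvLookup p.2 "primary_board" != "other" && pvLookup p.2 "diff_category" != "" then
          d.modify (pvLookup p.2 "primary_board") PySem.Dict.empty
            (fun dd => dd.modify (pvLookup p.2 "diff_category") [] (fun v => v ++ [p.1]))
        else d) _ _
  rw [hsplit]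
  refine Prod.ext ?_ ?_
  · rw [items_foldl_modify_append (PySem.List.enumerate dps)
        (fun p => pvLookup p.2 "primary_board") (fun p => p.1)]
    simp [List.filter_map, Function.comp_def]
  · rw [PySem.List.foldl_if_eq_foldl_filter]
    rw [items_foldl_modify_nested
        ((PySem.List.enumerate dps).filter
          (fun p => pvLookup p.2 "primary_board" != "other" && pvLookup p.2 "diff_category" != ""))
        (fun p => pvLookup p.2 "primary_board") (fun p => pvLookup p.2 "diff_category") (fun p => p.1)]
    simp [List.filter_map, Function.comp_def]
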